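-- pv_equiv track=rewrite | github.com/maatanyy/codingtest_study | 프로그래머스/lv2/12913. 땅따먹기/땅따먹기.py | solution
-- ===== SOURCE A (Python) =====
-- def solution(land):
--     answer = 0
--     dp = land
--
--     for i in range(1,len(land)):
--         for j in range(4):
--             dp[i][j] +=max(dp[i-1][:j]+dp[i-1][j+1:])
--
--     answer = max(dp[len(land)-1])
--     return answer
-- ===== SOURCE B (Python) =====
-- def solution(land):
--     for i in range(1, len(land)):
--         p = land[i - 1]
--         if p[0] >= p[1]:
--             top1, imax, top2 = p[0], 0, p[1]
--         else:
--             top1, imax, top2 = p[1], 1, p[0]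
--         for k in range(2, len(p)):
--             x = p[k]
--             if x > top1:
--                 top1, imax, top2 = x, k, top1
--             elif x > top2:
--                 top2 = x
--         for j in range(4):
--             land[i][j] += top2 if j == imax else top1
--     return max(land[-1])
-- ===== Notes on version B (the rewrite author's own statement) =====
-- stated objective: faster
-- what changed: For each row, instead of recomputing max(previous row minus column j) from two fresh slices for each of the 4 columns, B makes a single pass over the previous row keeping (top1, argmax index, runner-up counting multiplicity) and adds top1 to each column, or the runner-up at the argmax column.
import Mathlib
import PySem

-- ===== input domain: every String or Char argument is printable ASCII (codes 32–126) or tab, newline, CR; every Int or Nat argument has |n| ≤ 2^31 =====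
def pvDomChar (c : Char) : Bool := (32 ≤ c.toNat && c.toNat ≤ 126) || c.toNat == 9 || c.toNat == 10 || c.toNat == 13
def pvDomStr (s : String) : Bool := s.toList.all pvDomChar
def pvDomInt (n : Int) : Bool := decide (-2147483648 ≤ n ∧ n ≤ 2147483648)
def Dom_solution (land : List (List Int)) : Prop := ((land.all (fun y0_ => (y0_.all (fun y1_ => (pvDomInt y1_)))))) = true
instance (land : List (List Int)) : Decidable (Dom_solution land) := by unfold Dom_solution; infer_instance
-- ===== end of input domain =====

-- B replaces A's per-column rescan (max over the previous row minus one column, 4 times per row) by a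
-- single top-two (value, argmax, runner-up) scan of the previous row; both mutate `land` in place
-- identically, and the theorems below are about the return value.

-- ===== PORT A =====
-- A's inner loop 'for j in range(4): dp[i][j] += max(dp[i-1][:j]+dp[i-1][j+1:])'
def stepA (i : Int) (dp : List (List Int)) : List (List Int) :=
  (PySem.List.pyRange 0 4 1).foldl (fun dp j =>
    let m := (PySem.List.max?
        (PySem.List.slice (PySem.List.pyGetD dp (i - 1) []) none (some j) ++
         PySem.List.slice (PySem.List.pyGetD dp (i - 1) []) (some (j + 1)) none)
        (fun x => x)).getD 0
    PySem.List.pySetD dp i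
      (PySem.List.pySetD (PySem.List.pyGetD dp i []) j
        (PySem.List.pyGetD (PySem.List.pyGetD dp i []) j 0 + m))) dp

def solution (land : List (List Int)) : Int :=
  let dp := (PySem.List.pyRange 1 (land.length : Int) 1).foldl (fun dp i => stepA i dp) land
  (PySem.List.max? (PySem.List.pyGetD dp ((land.length : Int) - 1) []) (fun x => x)).getD 0

-- ===== PORT B =====
-- B's single pass over p: '(top1, imax, top2) from p[0],p[1]; for k in range(2,len(p)): …'
def topTwo (p : List Int) : Int × Int × Int :=
  (PySem.List.pyRange 2 (p.length : Int) 1).foldl (fun s k =>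
      let x := PySem.List.pyGetD p k 0
      if x > s.1 then (x, k, s.1) else if x > s.2.2 then (s.1, s.2.1, x) else s)
    (if PySem.List.pyGetD p 0 0 ≥ PySem.List.pyGetD p 1 0
     then (PySem.List.pyGetD p 0 0, 0, PySem.List.pyGetD p 1 0)
     else (PySem.List.pyGetD p 1 0, 1, PySem.List.pyGetD p 0 0))

-- B's inner loop 'for j in range(4): land[i][j] += top2 if j == imax else top1'
def stepB (i : Int) (dp : List (List Int)) : List (List Int) :=
  let s := topTwo (PySem.List.pyGetD dp (i - 1) [])
  (PySem.List.pyRange 0 4 1).foldl (fun dp j =>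
    PySem.List.pySetD dp i
      (PySem.List.pySetD (PySem.List.pyGetD dp i []) j
        (PySem.List.pyGetD (PySem.List.pyGetD dp i []) j 0 +
          (if j == s.2.1 then s.2.2 else s.1)))) dp

def solution_alt (land : List (List Int)) : Int :=
  let dp := (PySem.List.pyRange 1 (land.length : Int) 1).foldl (fun dp i => stepB i dp) land
  (PySem.List.max? (PySem.List.pyGetD dp (-1) []) (fun x => x)).getD 0

-- ===== PRECONDITION & SPEC =====
-- exactly the inputs on which A returns: a nonempty board, every row after the first with at least 4
-- columns, and a first row that is nonempty (alone) resp. has at least 2 columns (with rows below it)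
def Pre_solution (land : List (List Int)) : Prop :=
  land ≠ [] ∧ (∀ r ∈ land.tail, 4 ≤ r.length) ∧
  (land.length = 1 → land.getD 0 [] ≠ []) ∧ (2 ≤ land.length → 2 ≤ (land.getD 0 []).length)
instance (land : List (List Int)) : Decidable (Pre_solution land) := by unfold Pre_solution; infer_instance
def pvWitness_solution : List (List Int) := [[1,2,3,4],[4,3,2,1],[1,1,1,4]]

def Spec_solution (land : List (List Int)) (out : Int) : Prop := out = solution_alt land
instance (land : List (List Int)) (out : Int) : Decidable (Spec_solution land out) := by unfold Spec_solution; infer_instance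

-- ===== CLAIM (what is proved, stated in full; the proofs are below) =====
def Claim_equal_solution : Prop := ∀ (land : List (List Int)), Dom_solution land → Pre_solution land → Spec_solution land (solution land)

-- ===== LEMMAS AND PROOFS =====

-- Python's max() of a list, as both ports compute it
def M (l : List Int) : Int := (PySem.List.max? l (fun x => x)).getD 0

theorem M_eq_of (l : List Int) (t : Int) (ht : t ∈ l) (hb : ∀ x ∈ l, x ≤ t) : M l = t := by
  rcases l with _ | ⟨a, tl⟩
  · simp at ht
  · rw [M, PySem.List.max?_id_cons, Option.getD_some]
    have hmem : tl.foldl max a ∈ a :: tl := by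
      rcases PySem.List.foldl_max_mem tl a with h | h
      · rw [h]; exact List.mem_cons_self
      · exact List.mem_cons_of_mem a h
    have h1 : tl.foldl max a ≤ t := hb _ hmem
    have h2 : t ≤ tl.foldl max a := by
      rcases List.mem_cons.mp ht with h | h
      · rw [h]; exact (PySem.List.le_foldl_max tl a).1
      · exact (PySem.List.le_foldl_max tl a).2 t h
    omega

theorem M_append_singleton (l : List Int) (x : Int) (h : l ≠ []) :
    M (l ++ [x]) = max (M l) x := by
  rcases l with _ | ⟨a, t⟩
  · exact absurd rfl h
  · simp [M, PySem.List.max?_id_cons, List.foldl_append]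

-- the invariant of B's scan: s is (max of p, an argmax index, max of p minus that position)
def Good (p : List Int) (s : Int × Int × Int) : Prop :=
  ∃ im : Nat, s.2.1 = (im : Int) ∧ im < p.length ∧ p.getD im 0 = s.1 ∧
    (∀ x ∈ p, x ≤ s.1) ∧ s.2.2 = M (p.take im ++ p.drop (im + 1))

theorem good_init (a b : Int) :
    Good [a, b] (if a ≥ b then (a, 0, b) else (b, 1, a)) := by
  by_cases h : a ≥ b
  · rw [if_pos h]
    refine ⟨0, by simp, by simp, rfl, ?_, ?_⟩
    · intro x hx
      rcases List.mem_cons.mp hx with rfl | hx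
      · exact le_refl x
      · simp at hx; omega
    · simp [M, PySem.List.max?_id_cons]
  · rw [if_neg h]
    refine ⟨1, by simp, by simp, rfl, ?_, ?_⟩
    · intro x hx
      rcases List.mem_cons.mp hx with rfl | hx
      · omega
      · simp at hx; omega
    · simp [M, PySem.List.max?_id_cons]

theorem good_step (q : List Int) (x : Int) (s : Int × Int × Int)
    (hq : 2 ≤ q.length) (hgood : Good q s) :
    Good (q ++ [x])
      (if x > s.1 then (x, (q.length : Int), s.1)
       else if x > s.2.2 then (s.1, s.2.1, x) else s) := by
  obtain ⟨im, him, hlt, hval, hmax, ht2⟩ := hgood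
  have hqne : q ≠ [] := by intro h; rw [h] at hlt; simp at hlt
  have htake : (q ++ [x]).take im = q.take im := List.take_append_of_le_length (by omega)
  have hdrop : (q ++ [x]).drop (im + 1) = q.drop (im + 1) ++ [x] :=
    List.drop_append_of_le_length (by omega)
  have hgetim : (q ++ [x])[im]? = q[im]? := List.getElem?_append_left hlt
  have hrm_len : (q.take im ++ q.drop (im + 1)).length = q.length - 1 := by
    rw [List.length_append, List.length_take, List.length_drop]; omega
  have hrm_ne : q.take im ++ q.drop (im + 1) ≠ [] := by
    intro h
    rw [h] at hrm_len
    simp at hrm_len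
    omega
  by_cases h1 : x > s.1
  · refine ⟨q.length, by simp [h1], by simp, ?_, ?_, ?_⟩
    · simp [h1, List.getD]
    · intro y hy; simp [h1] at hy ⊢
      rcases hy with hy | hy
      · have := hmax y hy; omega
      · omega
    · simp [h1]
      have hmem : s.1 ∈ q := by
        rw [List.getD_eq_getElem q 0 hlt] at hval
        rw [← hval]; exact List.getElem_mem _
      exact (M_eq_of q s.1 hmem hmax).symm
  · by_cases h2 : x > s.2.2
    · refine ⟨im, by simp [h1, h2, him], by simp; omega, ?_, ?_, ?_⟩
      · simp only [h1, h2, if_false]; show (q ++ [x])[im]?.getD 0 = s.1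
        rw [hgetim]; exact hval
      · intro y hy; simp [h1, h2] at hy ⊢
        rcases hy with hy | hy
        · exact hmax y hy
        · omega
      · simp [h1, h2]
        rw [htake, hdrop, ← List.append_assoc, M_append_singleton _ _ hrm_ne, ← ht2]
        omega
    · refine ⟨im, by simp [h1, h2, him], by simp; omega, ?_, ?_, ?_⟩
      · simp only [h1, h2, if_false]; show (q ++ [x])[im]?.getD 0 = s.1
        rw [hgetim]; exact hval
      · intro y hy; simp [h1, h2] at hy ⊢
        rcases hy with hy | hy
        · exact hmax y hy
        · omega
      · simp [h1, h2]
        rw [htake, hdrop, ← List.append_assoc, M_append_singleton _ _ hrm_ne, ← ht2]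
        omega

theorem scan_good (p : List Int) :
    ∀ (fuel m : Nat) (s : Int × Int × Int), p.length - m ≤ fuel → 2 ≤ m → m ≤ p.length →
    Good (p.take m) s →
    Good p ((PySem.List.pyRange (m : Int) (p.length : Int) 1).foldl (fun s k =>
      let x := PySem.List.pyGetD p k 0
      if x > s.1 then (x, k, s.1) else if x > s.2.2 then (s.1, s.2.1, x) else s) s) := by
  intro fuel
  induction fuel with
  | zero =>
    intro m s hfuel hm2 hmle hgood
    have hm : m = p.length := by omega
    subst hm
    have hr : PySem.List.pyRange (p.length : Int) (p.length : Int) 1 = [] := by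
      rw [List.eq_nil_iff_forall_not_mem]
      intro k hk
      have := PySem.List.mem_pyRange_one.mp hk
      omega
    rw [hr]
    simpa using hgood
  | succ fuel ih =>
    intro m s hfuel hm2 hmle hgood
    rcases Nat.eq_or_lt_of_le hmle with hm | hm
    · have hr : PySem.List.pyRange (m : Int) (p.length : Int) 1 = [] := by
        rw [List.eq_nil_iff_forall_not_mem]
        intro k hk
        have := PySem.List.mem_pyRange_one.mp hk
        omega
      have hp : p.take m = p := by rw [hm]; exact List.take_length
      rw [hr]
      simpa [hp] using hgood
    · have hr : PySem.List.pyRange (m : Int) (p.length : Int) 1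
          = (m : Int) :: PySem.List.pyRange ((m : Int) + 1) (p.length : Int) 1 :=
        PySem.List.pyRange_one_cons (by exact_mod_cast hm)
      rw [hr, List.foldl_cons]
      have hlen : (p.take m).length = m := by simp; omega
      have hstep := good_step (p.take m) (p.getD m 0) s (by omega) hgood
      have hsome : p[m]? = some (p.getD m 0) := by
        rw [List.getD_eq_getElem p 0 hm]
        exact List.getElem?_eq_getElem hm
      have htakes : p.take (m + 1) = p.take m ++ [p.getD m 0] := by
        rw [List.take_add_one, hsome]
        rfl
      have hcast : ((m : Nat) : Int) + 1 = (((m + 1 : Nat)) : Int) := by omega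
      rw [hcast]
      refine ih (m + 1) _ (by omega) (by omega) (by omega) ?_
      rw [htakes]
      rw [hlen] at hstep
      simpa [PySem.List.pyGetD_natCast] using hstep

theorem topTwo_good (p : List Int) (h2 : 2 ≤ p.length) : Good p (topTwo p) := by
  obtain ⟨a, b, rest, hp⟩ : ∃ a b rest, p = a :: b :: rest := by
    rcases p with _ | ⟨a, _ | ⟨b, rest⟩⟩ <;> simp at h2
    exact ⟨a, b, rest, rfl⟩
  subst hp
  unfold topTwo
  have e0 : PySem.List.pyGetD (a :: b :: rest) 0 0 = a := by simp [pysem]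
  have e1 : PySem.List.pyGetD (a :: b :: rest) 1 0 = b := by simp [pysem]
  rw [e0, e1]
  have := scan_good (a :: b :: rest) ((a :: b :: rest).length) 2
    (if a ≥ b then (a, 0, b) else (b, 1, a)) (by omega) (by omega) (by simp)
    (by simpa using good_init a b)
  simpa using this

-- removing a non-argmax column leaves the maximum; removing the argmax leaves the runner-up
theorem core_lemma (p : List Int) (h2 : 2 ≤ p.length) (j : Nat) (_hj : j < 4) :
    M (p.take j ++ p.drop (j + 1))
      = if ((j : Nat) : Int) == (topTwo p).2.1 then (topTwo p).2.2 else (topTwo p).1 := by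
  obtain ⟨im, him, hlt, hval, hmax, ht2⟩ := topTwo_good p h2
  by_cases hje : j = im
  · subst hje
    rw [ht2]
    simp [him]
  · have hbeq : (((j : Nat) : Int) == (topTwo p).2.1) = false := by
      rw [him]; simp; omega
    rw [hbeq]
    simp only [Bool.false_eq_true, if_false]
    apply M_eq_of
    · -- the argmax position survives the removal of column j
      rcases Nat.lt_or_ge im j with h | h
      · apply List.mem_append_left
        have : (p.take j)[im]'(by simp; omega) = p[im]'hlt := List.getElem_take
        rw [List.getD, List.getElem?_eq_getElem hlt] at hval
        simp at hval
        rw [← hval, ← this]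
        exact List.getElem_mem _
      · have him' : j < im := by omega
        apply List.mem_append_right
        have hidx : im - (j + 1) < (p.drop (j + 1)).length := by simp; omega
        have : (p.drop (j + 1))[im - (j + 1)]'hidx = p[im]'(by omega) := by
          rw [List.getElem_drop]
          congr 1
          omega
        rw [List.getD, List.getElem?_eq_getElem hlt] at hval
        simp at hval
        rw [← hval, ← this]
        exact List.getElem_mem _
    · intro x hx
      rcases List.mem_append.mp hx with hx | hx
      · exact hmax x (List.mem_of_mem_take hx)
      · exact hmax x (List.mem_of_mem_drop hx)

theorem pyRange04 : PySem.List.pyRange 0 4 1 = [0, 1, 2, 3] := by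
  norm_num [PySem.List.pyRange_one_cons]

-- a foldl whose two bodies agree on every state satisfying an invariant P preserved by the loop
theorem foldl_eq_of_inv {α β : Type} (P : α → Prop) (f g : α → β → α) (l : List β)
    (h : ∀ acc x, x ∈ l → P acc → f acc x = g acc x ∧ P (f acc x)) :
    ∀ init, P init → l.foldl f init = l.foldl g init ∧ P (l.foldl f init) := by
  induction l with
  | nil => intro init hP; exact ⟨rfl, hP⟩
  | cons x t ih =>
    intro init hP
    obtain ⟨he, hPf⟩ := h init x (by simp) hP
    obtain ⟨ht, hPt⟩ := ih (fun acc y hy hPa => h acc y (by simp [hy]) hPa) (f init x) hPf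
    exact ⟨by simpa [List.foldl_cons, he] using ht, hPt⟩

-- numeral-index reads of a cons row (the rows of the board have symbolic tails)
theorem pyGetD_cons_one (x0 x1 : Int) (tl : List Int) (d : Int) :
    PySem.List.pyGetD (x0 :: x1 :: tl) (1 : Int) d = x1 := by
  rw [show (1 : Int) = ((1 : Nat) : Int) from by norm_num, PySem.List.pyGetD_natCast]
  rfl
theorem pyGetD_cons_two (x0 x1 x2 : Int) (tl : List Int) (d : Int) :
    PySem.List.pyGetD (x0 :: x1 :: x2 :: tl) (2 : Int) d = x2 := by
  rw [show (2 : Int) = ((2 : Nat) : Int) from by norm_num, PySem.List.pyGetD_natCast]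
  rfl
theorem pyGetD_cons_three (x0 x1 x2 x3 : Int) (tl : List Int) (d : Int) :
    PySem.List.pyGetD (x0 :: x1 :: x2 :: x3 :: tl) (3 : Int) d = x3 := by
  rw [show (3 : Int) = ((3 : Nat) : Int) from by norm_num, PySem.List.pyGetD_natCast]
  rfl

-- closed form of one pass of A's inner loop
set_option maxHeartbeats 2000000 in
theorem stepA_eval (dp : List (List Int)) (t : Nat) (h1 : 1 ≤ t) (h2 : t < dp.length)
    (p : List Int) (r0 r1 r2 r3 : Int) (rest : List Int)
    (hp : dp.getD (t - 1) [] = p) (hr : dp.getD t [] = r0 :: r1 :: r2 :: r3 :: rest) :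
    stepA (t : Int) dp = dp.set t
      ((r0 + M (p.take 0 ++ p.drop 1)) :: (r1 + M (p.take 1 ++ p.drop 2)) ::
       (r2 + M (p.take 2 ++ p.drop 3)) :: (r3 + M (p.take 3 ++ p.drop 4)) :: rest) := by
  have hcast : (t : Int) - 1 = ((t - 1 : Nat) : Int) := by omega
  have h2' : t - 1 < dp.length := by omega
  have hpt : dp[t-1]? = some p := by
    rw [List.getElem?_eq_getElem h2']
    rw [List.getD_eq_getElem dp [] h2'] at hp
    exact congrArg some hp
  have hrt : dp[t]? = some (r0 :: r1 :: r2 :: r3 :: rest) := by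
    rw [List.getElem?_eq_getElem h2]
    rw [List.getD_eq_getElem dp [] h2] at hr
    exact congrArg some hr
  have hne : t ≠ t - 1 := by omega
  unfold stepA
  rw [pyRange04]
  simp only [List.foldl_cons, List.foldl_nil, hcast, PySem.List.pyGetD_natCast,
    PySem.List.pySetD_natCast, List.getD, List.getElem?_set_ne hne, List.getElem?_set_self,
    List.length_set, h2, hpt, hrt, Option.getD_some]
  simp [M, PySem.List.pyGetD_zero_cons, pyGetD_cons_one, pyGetD_cons_two, pyGetD_cons_three,
    PySem.List.pySetD_of_nonneg, PySem.List.slice_to, PySem.List.slice_from, Int.toNat, List.set]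

-- closed form of one pass of B's inner loop
set_option maxHeartbeats 2000000 in
theorem stepB_eval (dp : List (List Int)) (t : Nat) (h1 : 1 ≤ t) (h2 : t < dp.length)
    (p : List Int) (r0 r1 r2 r3 : Int) (rest : List Int)
    (hp : dp.getD (t - 1) [] = p) (hr : dp.getD t [] = r0 :: r1 :: r2 :: r3 :: rest) :
    stepB (t : Int) dp = dp.set t
      ((r0 + (if (0:Int) == (topTwo p).2.1 then (topTwo p).2.2 else (topTwo p).1)) ::
       (r1 + (if (1:Int) == (topTwo p).2.1 then (topTwo p).2.2 else (topTwo p).1)) ::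
       (r2 + (if (2:Int) == (topTwo p).2.1 then (topTwo p).2.2 else (topTwo p).1)) ::
       (r3 + (if (3:Int) == (topTwo p).2.1 then (topTwo p).2.2 else (topTwo p).1)) :: rest) := by
  have hcast : (t : Int) - 1 = ((t - 1 : Nat) : Int) := by omega
  have h2' : t - 1 < dp.length := by omega
  have hpt : dp[t-1]? = some p := by
    rw [List.getElem?_eq_getElem h2']
    rw [List.getD_eq_getElem dp [] h2'] at hp
    exact congrArg some hp
  have hrt : dp[t]? = some (r0 :: r1 :: r2 :: r3 :: rest) := by
    rw [List.getElem?_eq_getElem h2]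
    rw [List.getD_eq_getElem dp [] h2] at hr
    exact congrArg some hr
  have hne : t ≠ t - 1 := by omega
  unfold stepB
  rw [pyRange04]
  simp only [List.foldl_cons, List.foldl_nil, hcast, PySem.List.pyGetD_natCast,
    PySem.List.pySetD_natCast, List.getD, List.getElem?_set_ne hne, List.getElem?_set_self,
    List.length_set, h2, hpt, hrt, Option.getD_some]
  simp [PySem.List.pyGetD_zero_cons, pyGetD_cons_one, pyGetD_cons_two, pyGetD_cons_three,
    PySem.List.pySetD_of_nonneg, Int.toNat, List.set]

theorem core0' (p : List Int) (h2 : 2 ≤ p.length) :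
    M (p.take 0 ++ p.drop 1)
      = (if (0:Int) == (topTwo p).2.1 then (topTwo p).2.2 else (topTwo p).1) := by
  simpa using core_lemma p h2 0 (by omega)
theorem core1' (p : List Int) (h2 : 2 ≤ p.length) :
    M (p.take 1 ++ p.drop 2)
      = (if (1:Int) == (topTwo p).2.1 then (topTwo p).2.2 else (topTwo p).1) := by
  simpa using core_lemma p h2 1 (by omega)
theorem core2' (p : List Int) (h2 : 2 ≤ p.length) :
    M (p.take 2 ++ p.drop 3)
      = (if (2:Int) == (topTwo p).2.1 then (topTwo p).2.2 else (topTwo p).1) := by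
  simpa using core_lemma p h2 2 (by omega)
theorem core3' (p : List Int) (h2 : 2 ≤ p.length) :
    M (p.take 3 ++ p.drop 4)
      = (if (3:Int) == (topTwo p).2.1 then (topTwo p).2.2 else (topTwo p).1) := by
  simpa using core_lemma p h2 3 (by omega)

theorem getD_set_ne' (l : List (List Int)) (t k : Nat) (v : List Int) (h : t ≠ k) :
    (l.set t v).getD k [] = l.getD k [] := by
  simp [List.getD, List.getElem?_set_ne h]
theorem getD_set_self' (l : List (List Int)) (t : Nat) (v : List Int) (h : t < l.length) :
    (l.set t v).getD t [] = v := by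
  simp [List.getD, h]

-- the two main folds agree and preserve the board's shape
theorem main_fold (land : List (List Int)) (hpre : Pre_solution land) :
    (PySem.List.pyRange 1 (land.length : Int) 1).foldl (fun dp i => stepA i dp) land
      = (PySem.List.pyRange 1 (land.length : Int) 1).foldl (fun dp i => stepB i dp) land
    ∧ ((PySem.List.pyRange 1 (land.length : Int) 1).foldl (fun dp i => stepA i dp) land).length
        = land.length := by
  obtain ⟨hne, htail, _hone, hfirst⟩ := hpre
  rcases Nat.lt_or_ge land.length 2 with hn | hn
  · have hr : PySem.List.pyRange 1 (land.length : Int) 1 = [] := by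
      rw [List.eq_nil_iff_forall_not_mem]
      intro k hk
      have := PySem.List.mem_pyRange_one.mp hk
      omega
    rw [hr]
    exact ⟨rfl, rfl⟩
  · have h := foldl_eq_of_inv
      (fun dp => dp.length = land.length ∧ 2 ≤ (dp.getD 0 []).length ∧
        ∀ k : Nat, 1 ≤ k → k < dp.length → 4 ≤ (dp.getD k []).length)
      (fun dp i => stepA i dp) (fun dp i => stepB i dp)
      (PySem.List.pyRange 1 (land.length : Int) 1)
      (by
        intro dp i hi hP
        obtain ⟨hlen, hfst, h4'⟩ := hP
        have hmem : 1 ≤ i ∧ i < (land.length : Int) := PySem.List.mem_pyRange_one.mp hi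
        obtain ⟨t, hit⟩ : ∃ t : Nat, i = (t : Int) := ⟨i.toNat, by omega⟩
        subst hit
        have h1 : 1 ≤ t := by omega
        have h2 : t < dp.length := by omega
        have hp2 : 2 ≤ (dp.getD (t - 1) []).length := by
          rcases Nat.eq_or_lt_of_le h1 with h | h
          · rw [← h]; simpa using hfst
          · have := h4' (t - 1) (by omega) (by omega); omega
        have hr4 : 4 ≤ (dp.getD t []).length := h4' t h1 h2
        obtain ⟨r0, r1, r2, r3, rest, hr⟩ :
            ∃ r0 r1 r2 r3 rest, dp.getD t [] = r0 :: r1 :: r2 :: r3 :: rest := by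
          rcases hrow : dp.getD t [] with _ | ⟨r0, _ | ⟨r1, _ | ⟨r2, _ | ⟨r3, rest⟩⟩⟩⟩ <;>
            rw [hrow] at hr4 <;> simp at hr4
          exact ⟨r0, r1, r2, r3, rest, rfl⟩
        have hA := stepA_eval dp t h1 h2 (dp.getD (t - 1) []) r0 r1 r2 r3 rest rfl hr
        have hB := stepB_eval dp t h1 h2 (dp.getD (t - 1) []) r0 r1 r2 r3 rest rfl hr
        refine ⟨?_, ?_, ?_, ?_⟩
        · show stepA (t : Int) dp = stepB (t : Int) dp
          rw [hA, hB, core0' _ hp2, core1' _ hp2, core2' _ hp2, core3' _ hp2]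
        · show (stepA (t : Int) dp).length = land.length
          rw [hA]; simpa using hlen
        · show 2 ≤ ((stepA (t : Int) dp).getD 0 []).length
          rw [hA, getD_set_ne' dp t 0 _ (by omega)]
          exact hfst
        · intro k hk1 hk2
          have hk2' : k < dp.length := by simpa [hA] using hk2
          show 4 ≤ ((stepA (t : Int) dp).getD k []).length
          by_cases hkt : k = t
          · subst hkt
            rw [hA, getD_set_self' dp k _ hk2']
            simp
          · rw [hA, getD_set_ne' dp t k _ (fun h => hkt h.symm)]
            exact h4' k hk1 hk2')
      land ⟨rfl, hfirst hn, by
        intro k hk1 hk2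
        have : land.getD k [] ∈ land.tail := by
          have hk2' : k - 1 < land.tail.length := by simp; omega
          have : land.tail[k - 1]'hk2' = land[k]'hk2 := by
            rw [List.getElem_tail]
            congr 1
            omega
          rw [List.getD_eq_getElem land [] hk2, ← this]
          exact List.getElem_mem _
        exact htail _ this⟩
    exact ⟨h.1, h.2.1⟩

-- ===== VERDICT (by name: the statement is the Claim_ definition above) =====
theorem solution_spec : Claim_equal_solution := by
  intro land _hdom hpre
  have hne := hpre.1
  obtain ⟨heq, hlen⟩ := main_fold land hpre
  unfold Spec_solution solution solution_alt
  dsimp only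
  rw [← heq]
  set dp := (PySem.List.pyRange 1 (land.length : Int) 1).foldl (fun dp i => stepA i dp) land with hdp
  have hdpne : dp ≠ [] := by
    intro h; rw [h] at hlen; exact hne (List.length_eq_zero_iff.mp hlen.symm)
  have hlast : PySem.List.pyGetD dp (-1) [] = dp.getLast hdpne := by
    simp [pysem, hdpne]
  have hlt : land.length - 1 < dp.length := by
    have : 0 < land.length := List.length_pos_iff.mpr hne
    omega
  have hcast : (land.length : Int) - 1 = ((land.length - 1 : Nat) : Int) := by
    have : 0 < land.length := List.length_pos_iff.mpr hne
    omega
  rw [hcast, PySem.List.pyGetD_natCast, hlast,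
    List.getD_eq_getElem dp [] hlt, List.getLast_eq_getElem]
  simp only [hlen]
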